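-- pv_equiv track=rewrite | github.com/mstach60161/Text-algorithms | lab6/dbf.py | sort_rename
-- ===== SOURCE A (Python) =====
-- def sort_rename(sequence):
--     last_entry = None
--     index = 0
--     position_to_index = [None] * len(sequence)
--     first_entry = {}
--     for entry in sorted([(e, i) for i, e in enumerate(sequence)]):
--         if last_entry and last_entry[0] != entry[0]:
--             index += 1
--             first_entry[index] = entry[1]
--
--         position_to_index[entry[1]] = index
--         if last_entry is None:
--             first_entry[0] = entry[1]
--         last_entry = entry
--     return position_to_index, first_entry
-- ===== SOURCE B (Python) =====
-- def sort_rename(sequence):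
--     values = sorted(set(sequence))
--     ranks = {v: r for r, v in enumerate(values)}
--     position_to_index = [ranks[e] for e in sequence]
--     first_seen = {}
--     for i, e in enumerate(sequence):
--         if e not in first_seen:
--             first_seen[e] = i
--     first_entry = {r: first_seen[v] for r, v in enumerate(values)}
--     return position_to_index, first_entry
-- ===== Notes on version B (the rewrite author's own statement) =====
-- stated objective: simpler
-- what changed: Instead of one stateful scan over the sorted (value, index) pairs that simultaneously grows the rank counter, fills positions and records group starts, B builds a rank table from sorted(set(sequence)), maps the sequence through it, and records each value's first occurrence in a separate forward pass.
import Mathlib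
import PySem

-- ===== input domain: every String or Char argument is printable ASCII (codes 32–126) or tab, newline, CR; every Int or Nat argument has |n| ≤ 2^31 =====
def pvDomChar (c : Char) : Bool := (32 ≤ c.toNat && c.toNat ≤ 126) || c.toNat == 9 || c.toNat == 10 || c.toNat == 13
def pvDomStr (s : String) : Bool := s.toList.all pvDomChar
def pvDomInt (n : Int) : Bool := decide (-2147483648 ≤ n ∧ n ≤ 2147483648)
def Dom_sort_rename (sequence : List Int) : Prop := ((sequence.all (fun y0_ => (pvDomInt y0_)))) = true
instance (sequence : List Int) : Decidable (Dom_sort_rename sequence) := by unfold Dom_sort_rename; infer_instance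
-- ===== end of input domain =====

-- B replaces A's single stateful scan over the sorted (value, index) pairs by a rank table built
-- from sorted(set(sequence)) plus a separate first-occurrence pass (objective: simpler).

-- ===== PORT A =====
-- loop body of A's 'for entry in sorted(...)' loop; state = (last_entry, index, position_to_index, first_entry).
-- position_to_index is a List (Option Int): 'none' models Python's None placeholders from '[None] * len(sequence)'.
def pvStepA (st : Option (Int × Int) × Int × List (Option Int) × PySem.Dict Int Int)
    (entry : Int × Int) : Option (Int × Int) × Int × List (Option Int) × PySem.Dict Int Int :=
  match st with
  | (last, index, pti, fe) =>
    let (index, fe) :=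
      match last with
      | some l => if l.1 ≠ entry.1 then (index + 1, fe.insert (index + 1) entry.2) else (index, fe)
      | none => (index, fe)
    let pti := PySem.List.pySetD pti entry.2 (some index)
    let fe := match last with
      | none => fe.insert 0 entry.2
      | some _ => fe
    (some entry, index, pti, fe)

def sort_rename (sequence : List Int) : List Int × (List (Int × Int)) :=
  let pairs := (PySem.List.enumerate sequence 0).map (fun p => (p.2, p.1))
  let sortedPairs := PySem.List.sorted2 pairs (fun p => p.1) (fun p => p.2) false
  let final := sortedPairs.foldl pvStepA (none, 0, List.replicate sequence.length none, PySem.Dict.empty)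
  -- every slot of position_to_index has been overwritten, so '.getD 0' only converts Option Int to Int
  (final.2.2.1.map (fun o => o.getD 0), final.2.2.2.items)

-- ===== PORT B =====
def sort_rename_alt (sequence : List Int) : List Int × (List (Int × Int)) :=
  let values := PySem.List.sorted (PySem.Set.ofList sequence) (fun x => x) false
  -- ranks = {v: r for r, v in enumerate(values)}
  let ranks := (PySem.List.enumerate values 0).foldl (fun d p => d.insert p.2 p.1) PySem.Dict.empty
  -- ranks[e] never raises (e ∈ values), so the lookup is ported as getD with an unused default
  let positionToIndex := sequence.map (fun e => ranks.getD e 0)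
  let firstSeen := (PySem.List.enumerate sequence 0).foldl
      (fun d p => if d.contains p.2 then d else d.insert p.2 p.1) PySem.Dict.empty
  -- first_entry = {r: first_seen[v] for r, v in enumerate(values)}; first_seen[v] never raises
  let firstEntry := (PySem.List.enumerate values 0).foldl
      (fun d p => d.insert p.1 (firstSeen.getD p.2 0)) PySem.Dict.empty
  (positionToIndex, firstEntry.items)

-- ===== PRECONDITION & SPEC =====
def Spec_sort_rename (sequence : List Int) (out : List Int × (List (Int × Int))) : Prop := out = sort_rename_alt sequence
instance (sequence : List Int) (out : List Int × (List (Int × Int))) : Decidable (Spec_sort_rename sequence out) := by unfold Spec_sort_rename; infer_instance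

-- ===== CLAIM (what is proved, stated in full; the proofs are below) =====
def Claim_equal_sort_rename : Prop := ∀ (sequence : List Int), Dom_sort_rename sequence → Spec_sort_rename sequence (sort_rename sequence)

-- ===== LEMMAS AND PROOFS =====

def pvLexB (p q : Int × Int) : Bool := decide (p.1 < q.1) || (!decide (q.1 < p.1) && decide (p.2 < q.2))
theorem pvLexB_asymm {p q : Int × Int} (h : pvLexB p q = true) : pvLexB q p = false := by
  simp [pvLexB] at *; omega
theorem pvLexB_trans {p q r : Int × Int} (h1 : pvLexB p q = true) (h2 : pvLexB q r = true) :
    pvLexB p r = true := by simp [pvLexB] at *; omega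

theorem pvLexB_antisymm {p q : Int × Int} (h1 : pvLexB p q = false) (h2 : pvLexB q p = false) :
    p = q := by
  simp [pvLexB] at *
  have h3 : p.1 = q.1 ∧ p.2 = q.2 := by omega
  exact Prod.ext h3.1 h3.2

theorem pv_insertBy_pairwise (x : Int × Int) (acc : List (Int × Int))
    (h : acc.Pairwise (fun a b => pvLexB b a = false)) :
    (PySem.List.insertBy pvLexB x acc).Pairwise (fun a b => pvLexB b a = false) := by
  induction acc with
  | nil => simp [PySem.List.insertBy]
  | cons y ys ih =>
    rw [List.pairwise_cons] at h
    cases hb : pvLexB x y with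
    | true =>
      rw [show PySem.List.insertBy pvLexB x (y :: ys) = x :: y :: ys from by
        simp [PySem.List.insertBy, hb]]
      refine List.Pairwise.cons ?_ (List.Pairwise.cons h.1 h.2)
      intro z hz
      rcases List.mem_cons.mp hz with rfl | hz
      · exact pvLexB_asymm hb
      · cases hzx : pvLexB z x with
        | false => rfl
        | true =>
          have := pvLexB_trans hzx hb
          rw [h.1 z hz] at this; exact this.symm
    | false =>
      rw [show PySem.List.insertBy pvLexB x (y :: ys) = y :: PySem.List.insertBy pvLexB x ys from by
        simp [PySem.List.insertBy, hb]]
      refine List.Pairwise.cons ?_ (ih h.2)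
      intro z hz
      rw [PySem.List.mem_insertBy] at hz
      rcases hz with rfl | hz
      · exact hb
      · exact h.1 z hz

theorem pv_sorted2_pairwise (xs : List (Int × Int)) :
    (PySem.List.sorted2 xs (fun p => p.1) (fun p => p.2) false).Pairwise
      (fun a b => pvLexB b a = false) := by
  show (xs.foldl (fun acc x => PySem.List.insertBy pvLexB x acc) []).Pairwise _
  have : ∀ (l : List (Int × Int)) (acc : List (Int × Int)),
      acc.Pairwise (fun a b => pvLexB b a = false) →
      (l.foldl (fun acc x => PySem.List.insertBy pvLexB x acc) acc).Pairwise
        (fun a b => pvLexB b a = false) := by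
    intro l
    induction l with
    | nil => intro acc h; exact h
    | cons x l ih => intro acc h; exact ih _ (pv_insertBy_pairwise x acc h)
  exact this xs [] (by simp)

def pvPairs (s : List Int) : List (Int × Int) := (PySem.List.enumerate s 0).map (fun p => (p.2, p.1))
def pvVals (s : List Int) : List Int := PySem.List.sorted (PySem.Set.ofList s) (fun x => x) false
def pvGrp (s : List Int) (v : Int) : List (Int × Int) := (pvPairs s).filter (fun p => p.1 == v)

theorem pvPairs_snd_lt (s : List Int) : (pvPairs s).Pairwise (fun a b => a.2 < b.2) := by
  unfold pvPairs
  rw [List.pairwise_map]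
  exact PySem.List.pairwise_lt_enumerate s 0

theorem pvPairs_fst_mem {s : List Int} {p : Int × Int} (hp : p ∈ pvPairs s) : p.1 ∈ s := by
  have : p.1 ∈ (pvPairs s).map (fun q => q.1) := List.mem_map_of_mem hp
  rwa [show (pvPairs s).map (fun q => q.1) = s from by
    unfold pvPairs; rw [List.map_map]; exact PySem.List.map_snd_enumerate s 0] at this

theorem pvVals_mem {s : List Int} {v : Int} : v ∈ pvVals s ↔ v ∈ s := by
  unfold pvVals
  rw [PySem.List.mem_sorted, PySem.Set.mem_ofList]

theorem pvVals_lt (s : List Int) : (pvVals s).Pairwise (· < ·) :=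
  PySem.List.sorted_ofList_pairwise_lt s

theorem pv_flatMap_mem {s : List Int} {p : Int × Int} :
    p ∈ (pvVals s).flatMap (pvGrp s) ↔ p ∈ pvPairs s := by
  rw [List.mem_flatMap]
  constructor
  · rintro ⟨v, -, hp⟩
    exact List.mem_of_mem_filter hp
  · intro hp
    exact ⟨p.1, pvVals_mem.mpr (pvPairs_fst_mem hp), by simp [pvGrp, hp]⟩

theorem pvGrp_fst {s : List Int} {v : Int} {p : Int × Int} (hp : p ∈ pvGrp s v) : p.1 = v := by
  have := List.of_mem_filter hp
  simpa using this

theorem pv_flatMap_pairwise_lt (s : List Int) :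
    ((pvVals s).flatMap (pvGrp s)).Pairwise (fun a b => pvLexB a b = true) := by
  rw [List.pairwise_flatMap]
  constructor
  · intro v hv
    refine List.Pairwise.imp_of_mem ?_ ((pvPairs_snd_lt s).filter _)
    intro a b ha hb hab
    have h1 : a.1 = v := pvGrp_fst ha
    have h2 : b.1 = v := pvGrp_fst hb
    simp [pvLexB, h1, h2]; omega
  · refine List.Pairwise.imp ?_ (pvVals_lt s)
    intro v1 v2 h12 x hx y hy
    have h1 : x.1 = v1 := pvGrp_fst hx
    have h2 : y.1 = v2 := pvGrp_fst hy
    simp [pvLexB, h1, h2]; omega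

theorem pvLexB_ne {p q : Int × Int} (h : pvLexB p q = true) : p ≠ q := by
  intro he; subst he
  have := pvLexB_asymm h
  rw [this] at h; cases h

theorem pvPairs_nodup (s : List Int) : (pvPairs s).Nodup :=
  (pvPairs_snd_lt s).imp (fun h => by intro he; subst he; omega)

theorem pv_flatMap_nodup (s : List Int) : ((pvVals s).flatMap (pvGrp s)).Nodup :=
  (pv_flatMap_pairwise_lt s).imp (fun h => pvLexB_ne h)

theorem pv_flatMap_perm (s : List Int) : ((pvVals s).flatMap (pvGrp s)).Perm (pvPairs s) := by
  rw [List.perm_ext_iff_of_nodup (pv_flatMap_nodup s) (pvPairs_nodup s)]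
  intro p; exact pv_flatMap_mem

theorem pv_sorted2_eq_flatMap (s : List Int) :
    PySem.List.sorted2 (pvPairs s) (fun p => p.1) (fun p => p.2) false
      = (pvVals s).flatMap (pvGrp s) := by
  refine List.eq_of_perm_of_sorted (fun a b _ _ h1 h2 => pvLexB_antisymm h2 h1) (pv_sorted2_pairwise _) ((pv_flatMap_pairwise_lt s).imp (fun h => pvLexB_asymm h)) ?_
  exact (PySem.List.sorted2_perm _ _ _ _).trans (pv_flatMap_perm s).symm

theorem pvStepA_same (lastp entry : Int × Int) (h : lastp.1 = entry.1) (r : Int)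
    (pti : List (Option Int)) (fe : PySem.Dict Int Int) :
    pvStepA (some lastp, r, pti, fe) entry
      = (some entry, r, PySem.List.pySetD pti entry.2 (some r), fe) := by
  simp [pvStepA, h]

theorem pvStepA_new (lastp entry : Int × Int) (h : lastp.1 ≠ entry.1) (r : Int)
    (pti : List (Option Int)) (fe : PySem.Dict Int Int) :
    pvStepA (some lastp, r, pti, fe) entry
      = (some entry, r + 1, PySem.List.pySetD pti entry.2 (some (r + 1)),
         fe.insert (r + 1) entry.2) := by
  simp [pvStepA, h]

theorem pvStepA_none (entry : Int × Int) (r : Int)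
    (pti : List (Option Int)) (fe : PySem.Dict Int Int) :
    pvStepA (none, r, pti, fe) entry
      = (some entry, r, PySem.List.pySetD pti entry.2 (some r), fe.insert 0 entry.2) := by
  simp [pvStepA]

theorem pv_tailFold (v : Int) (t : List (Int × Int)) (ht : ∀ p ∈ t, p.1 = v) :
    ∀ (lastp : Int × Int), lastp.1 = v → ∀ (r : Int) (pti : List (Option Int)) (fe : PySem.Dict Int Int),
    t.foldl pvStepA (some lastp, r, pti, fe)
      = (some (t.getLastD lastp), r,
         t.foldl (fun l p => PySem.List.pySetD l p.2 (some r)) pti, fe) := by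
  induction t with
  | nil => intro lastp hl r pti fe; simp
  | cons p t ih =>
    intro lastp hl r pti fe
    have hp : p.1 = v := ht p (by simp)
    rw [List.foldl_cons, pvStepA_same lastp p (by rw [hl, hp]) r pti fe,
      ih (fun q hq => ht q (by simp [hq])) p hp r _ fe]
    rw [List.getLastD_cons, List.foldl_cons]

theorem pv_getLastD_append {α : Type} (xs ys : List α) (d : α) :
    (xs ++ ys).getLastD d = ys.getLastD (xs.getLastD d) := by
  induction xs generalizing d with
  | nil => simp
  | cons x xs ih => rw [List.cons_append, List.getLastD_cons, List.getLastD_cons, ih]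

theorem pv_loopA (grp : Int → List (Int × Int)) :
    ∀ (vs : List Int) (w : Int × Int) (r : Int) (pti : List (Option Int)) (fe : PySem.Dict Int Int),
    (w.1 :: vs).Nodup →
    (∀ v ∈ vs, grp v ≠ []) →
    (∀ v ∈ vs, ∀ p ∈ grp v, p.1 = v) →
    (vs.flatMap grp).foldl pvStepA (some w, r, pti, fe)
      = (some ((vs.flatMap grp).getLastD w),
         r + vs.length,
         (vs.flatMap grp).foldl
           (fun l p => PySem.List.pySetD l p.2 (some (r + 1 + (vs.idxOf p.1 : Int)))) pti,
         (PySem.List.enumerate vs (r + 1)).foldl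
           (fun fe q => fe.insert q.1 ((grp q.2).headD (0, 0)).2) fe) := by
  intro vs
  induction vs with
  | nil => intro w r pti fe _ _ _; simp [PySem.List.enumerate_nil]
  | cons v rest ih =>
    intro w r pti fe hnd hne hfst
    have hwv : w.1 ≠ v := by
      have h1 := (List.nodup_cons.mp hnd).1
      intro he; exact h1 (by simp [he])
    obtain ⟨g0, gt, hg⟩ : ∃ g0 gt, grp v = g0 :: gt := by
      rcases h : grp v with _ | ⟨g0, gt⟩
      · exact absurd h (hne v (by simp))
      · exact ⟨g0, gt, rfl⟩
    have hg0 : g0.1 = v := hfst v (by simp) g0 (by rw [hg]; simp)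
    have hgt : ∀ p ∈ gt, p.1 = v := fun p hp => hfst v (by simp) p (by rw [hg]; simp [hp])
    have hlast : (gt.getLastD g0).1 = v := by
      rcases List.mem_cons.mp (List.getLastD_mem_cons (l := gt) (a := g0)) with h | h
      · rw [h, hg0]
      · exact hgt _ h
    have hnd2 : ((gt.getLastD g0).1 :: rest).Nodup := by
      rw [hlast]; exact (List.nodup_cons.mp hnd).2
    rw [List.flatMap_cons, List.foldl_append, hg, List.foldl_cons,
      pvStepA_new w g0 (by rw [hg0]; exact hwv) r pti fe,
      pv_tailFold v gt hgt g0 hg0 (r + 1) _ _,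
      ih (gt.getLastD g0) (r + 1) _ _ hnd2 (fun u hu => hne u (by simp [hu]))
        (fun u hu => hfst u (by simp [hu]))]
    refine congrArg₂ Prod.mk ?_ (congrArg₂ Prod.mk ?_ (congrArg₂ Prod.mk ?_ ?_))
    · rw [List.cons_append, List.getLastD_cons, pv_getLastD_append]
    · simp only [List.length_cons]; push_cast; ring
    · rw [List.foldl_append, List.foldl_cons]
      have e1 : PySem.List.pySetD pti g0.2 (some (r + 1 + (List.idxOf g0.1 (v :: rest) : Int)))
          = PySem.List.pySetD pti g0.2 (some (r + 1)) := by
        rw [hg0, List.idxOf_cons_self]; norm_num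
      rw [e1]
      have e2 : gt.foldl (fun l p => PySem.List.pySetD l p.2
            (some (r + 1 + (List.idxOf p.1 (v :: rest) : Int))))
            (PySem.List.pySetD pti g0.2 (some (r + 1)))
          = gt.foldl (fun l p => PySem.List.pySetD l p.2 (some (r + 1)))
            (PySem.List.pySetD pti g0.2 (some (r + 1))) := by
        refine PySem.List.foldl_congr_mem _ _ _ _ ?_
        intro acc p hp
        rw [hgt p hp, List.idxOf_cons_self]; norm_num
      rw [e2]
      refine (PySem.List.foldl_congr_mem _ _ _ _ ?_).symm
      intro acc p hp
      obtain ⟨u, hu, hpu⟩ := List.mem_flatMap.mp hp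
      have hp1 : p.1 = u := hfst u (by simp [hu]) p hpu
      have hvp : v ≠ p.1 := by
        rw [hp1]; intro he
        exact (List.nodup_cons.mp (List.nodup_cons.mp hnd).2).1 (he ▸ hu)
      rw [List.idxOf_cons_ne _ hvp]
      push_cast; ring_nf
    · rw [PySem.List.enumerate_cons, List.foldl_cons, hg]
      rfl

-- length is preserved by the position_to_index writes
theorem pv_setFold_length (T : List (Int × Int)) (g : Int × Int → Int) :
    ∀ (l0 : List (Option Int)),
    (T.foldl (fun l p => PySem.List.pySetD l p.2 (some (g p))) l0).length = l0.length := by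
  induction T with
  | nil => intro l0; rfl
  | cons q T ih => intro l0; rw [List.foldl_cons, ih, PySem.List.length_pySetD]

theorem pv_setFold_noTouch (i : Nat) (T : List (Int × Int)) (g : Int × Int → Int)
    (h : ∀ q ∈ T, 0 ≤ q.2 ∧ q.2 ≠ (i : Int)) :
    ∀ (l0 : List (Option Int)),
    (T.foldl (fun l p => PySem.List.pySetD l p.2 (some (g p))) l0)[i]? = l0[i]? := by
  induction T with
  | nil => intro l0; rfl
  | cons q T ih =>
    intro l0
    rw [List.foldl_cons, ih (fun p hp => h p (by simp [hp]))]
    obtain ⟨h0, hne⟩ := h q (by simp)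
    rw [PySem.List.pySetD_of_nonneg _ _ h0, List.getElem?_set_ne
      (by intro he; exact hne (by rw [← he, Int.toNat_of_nonneg h0]))]

theorem pv_setFold_value (i : Nat) (p0 : Int × Int) (g : Int × Int → Int) :
    ∀ (T : List (Int × Int)), p0 ∈ T → p0.2 = (i : Int) →
    (∀ q ∈ T, 0 ≤ q.2) → (∀ q ∈ T, q.2 = (i : Int) → q = p0) →
    ∀ (l0 : List (Option Int)), i < l0.length →
    (T.foldl (fun l p => PySem.List.pySetD l p.2 (some (g p))) l0)[i]? = some (some (g p0)) := by
  intro T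
  induction T with
  | nil => intro h; cases h
  | cons q T ih =>
    intro hmem hp0 hpos huniq l0 hi
    rw [List.foldl_cons]
    by_cases hqT : p0 ∈ T
    · exact ih hqT hp0 (fun q hq => hpos q (by simp [hq]))
        (fun q hq h2 => huniq q (by simp [hq]) h2) _
        (by rw [PySem.List.length_pySetD]; exact hi)
    · have hq : q = p0 := by
        rcases List.mem_cons.mp hmem with h | h
        · exact h.symm
        · exact absurd h hqT
      subst hq
      rw [pv_setFold_noTouch i T g ?_ _]
      · rw [hp0, PySem.List.pySetD_natCast, List.getElem?_set_self hi]
      · intro p hp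
        refine ⟨hpos p (by simp [hp]), ?_⟩
        intro he
        exact hqT ((huniq p (by simp [hp]) he) ▸ hp)

theorem pv_enumFind (u : Int) :
    ∀ (s : List Int) (t : Int), u ∈ s →
    (PySem.List.enumerate s t).find? (fun q => q.2 == u) = some (t + (s.idxOf u : Int), u) := by
  intro s
  induction s with
  | nil => intro t h; cases h
  | cons x xs ih =>
    intro t hu
    rw [PySem.List.enumerate_cons]
    by_cases hx : x = u
    · subst hx
      rw [List.find?_cons_of_pos (by simp), List.idxOf_cons_self]
      norm_num
    · have hu' : u ∈ xs := by
        rcases List.mem_cons.mp hu with h | h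
        · exact absurd h.symm hx
        · exact h
      rw [List.find?_cons_of_neg (by simp [hx]), ih (t + 1) hu',
        List.idxOf_cons_ne _ (by exact hx)]
      push_cast; ring_nf

theorem pv_rkAux_not (u : Int) :
    ∀ (vs : List Int) (t : Int) (d : PySem.Dict Int Int), u ∉ vs →
    ((PySem.List.enumerate vs t).foldl (fun d p => d.insert p.2 p.1) d).get? u = d.get? u := by
  intro vs
  induction vs with
  | nil => intro t d _; rfl
  | cons x xs ih =>
    intro t d hu
    rw [PySem.List.enumerate_cons, List.foldl_cons, ih (t + 1) _ (fun h => hu (by simp [h]))]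
    exact PySem.Dict.get?_insert_of_ne _ _ (fun h => hu (by simp [h]))

theorem pv_rkAux (u : Int) :
    ∀ (vs : List Int) (t : Int) (d : PySem.Dict Int Int), vs.Nodup → u ∈ vs →
    ((PySem.List.enumerate vs t).foldl (fun d p => d.insert p.2 p.1) d).get? u
      = some (t + (vs.idxOf u : Int)) := by
  intro vs
  induction vs with
  | nil => intro t d _ h; cases h
  | cons x xs ih =>
    intro t d hnd hu
    rw [PySem.List.enumerate_cons, List.foldl_cons]
    by_cases hx : x = u
    · subst hx
      rw [pv_rkAux_not x xs (t + 1) _ (List.nodup_cons.mp hnd).1,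
        PySem.Dict.get?_insert_self, List.idxOf_cons_self]
      norm_num
    · have hu' : u ∈ xs := by
        rcases List.mem_cons.mp hu with h | h
        · exact absurd h.symm hx
        · exact h
      rw [ih (t + 1) _ (List.nodup_cons.mp hnd).2 hu', List.idxOf_cons_ne _ (by exact hx)]
      push_cast; ring_nf

theorem pv_fsAux_contains (u : Int) :
    ∀ (s : List Int) (t : Int) (d : PySem.Dict Int Int), d.contains u = true →
    ((PySem.List.enumerate s t).foldl
        (fun d p => if d.contains p.2 then d else d.insert p.2 p.1) d).get? u = d.get? u := by
  intro s
  induction s with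
  | nil => intro t d _; rfl
  | cons x xs ih =>
    intro t d hc
    rw [PySem.List.enumerate_cons, List.foldl_cons]
    by_cases hx : d.contains x
    · simp only [hx, if_true]
      exact ih (t + 1) d hc
    · simp only [hx, if_false, Bool.false_eq_true]
      have hxu : x ≠ u := fun h => hx (h ▸ hc)
      rw [ih (t + 1) _ (by rw [PySem.Dict.contains_insert]; simp [hc])]
      exact PySem.Dict.get?_insert_of_ne _ _ (fun h => hxu h.symm)

theorem pv_fsAux (u : Int) :
    ∀ (s : List Int) (t : Int) (d : PySem.Dict Int Int), d.contains u = false → u ∈ s →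
    ((PySem.List.enumerate s t).foldl
        (fun d p => if d.contains p.2 then d else d.insert p.2 p.1) d).get? u
      = some (t + (s.idxOf u : Int)) := by
  intro s
  induction s with
  | nil => intro t d _ h; cases h
  | cons x xs ih =>
    intro t d hc hu
    rw [PySem.List.enumerate_cons, List.foldl_cons]
    by_cases hx : x = u
    · subst hx
      simp only [hc, if_false, Bool.false_eq_true]
      rw [pv_fsAux_contains x xs (t + 1) _ (by rw [PySem.Dict.contains_insert]; simp),
        PySem.Dict.get?_insert_self, List.idxOf_cons_self]
      norm_num
    · have hu' : u ∈ xs := by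
        rcases List.mem_cons.mp hu with h | h
        · exact absurd h.symm hx
        · exact h
      have hres : ∀ d' : PySem.Dict Int Int, d'.contains u = false →
          ((PySem.List.enumerate xs (t + 1)).foldl
            (fun d p => if d.contains p.2 then d else d.insert p.2 p.1) d').get? u
            = some (t + ((x :: xs).idxOf u : Int)) := by
        intro d' hd'
        rw [ih (t + 1) d' hd' hu', List.idxOf_cons_ne _ (by exact hx)]
        push_cast; ring_nf
      by_cases hdx : d.contains x
      · simp only [hdx, if_true]; exact hres d hc
      · simp only [hdx, if_false, Bool.false_eq_true]
        refine hres _ ?_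
        rw [PySem.Dict.contains_insert, hc]
        simp [show u ≠ x from fun h => hx h.symm]

theorem pv_grp_head {s : List Int} {u : Int} (hu : u ∈ s) :
    ((pvGrp s u).headD (0, 0)).2 = (s.idxOf u : Int) := by
  unfold pvGrp pvPairs
  rw [List.filter_map, List.headD_eq_head?_getD, List.head?_map,
    show ((fun p : Int × Int => p.1 == u) ∘ fun p : Int × Int => (p.2, p.1))
      = fun q : Int × Int => q.2 == u from rfl,
    List.head?_filter, pv_enumFind u s 0 hu]
  norm_num

theorem pvGrp_ne_nil {s : List Int} {v : Int} (hv : v ∈ s) : pvGrp s v ≠ [] := by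
  have h0 : v ∈ (pvPairs s).map (fun q => q.1) := by
    rw [show (pvPairs s).map (fun q => q.1) = s from by
      unfold pvPairs; rw [List.map_map]; exact PySem.List.map_snd_enumerate s 0]
    exact hv
  obtain ⟨p, hp, hp1⟩ := List.mem_map.mp h0
  have : p ∈ pvGrp s v := by
    unfold pvGrp; rw [List.mem_filter]; exact ⟨hp, by simp [hp1]⟩
  exact List.ne_nil_of_mem this

theorem pvVals_nodup (s : List Int) : (pvVals s).Nodup :=
  (pvVals_lt s).imp (fun h => ne_of_lt h)

theorem pv_B_canon (s : List Int) :
    sort_rename_alt s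
      = (s.map (fun e => ((pvVals s).idxOf e : Int)),
         (PySem.List.enumerate (pvVals s) 0).map (fun q => (q.1, (s.idxOf q.2 : Int)))) := by
  have hvals : PySem.List.sorted (PySem.Set.ofList s) (fun x => x) false = pvVals s := rfl
  show ((s.map fun e => _), _) = _
  rw [hvals]
  refine congrArg₂ Prod.mk ?_ ?_
  · refine List.map_congr_left ?_
    intro e he
    rw [PySem.Dict.getD_eq_get?_getD,
      pv_rkAux e (pvVals s) 0 _ (pvVals_nodup s) (pvVals_mem.mpr he)]
    norm_num
  · rw [PySem.Dict.items_foldl_insert_fresh (PySem.List.enumerate (pvVals s) 0)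
      (fun p : Int × Int => p.1)
      (fun p : Int × Int => (((PySem.List.enumerate s 0).foldl
          (fun d p => if d.contains p.2 then d else d.insert p.2 p.1)
          PySem.Dict.empty).getD p.2 0))
      PySem.Dict.empty
      (fun a _ => PySem.Dict.contains_empty _)
      (by rw [PySem.List.map_fst_enumerate]; exact PySem.List.nodup_pyRange_one _ _)]
    show List.map _ _ = _
    refine (List.map_congr_left ?_)
    intro q hq
    obtain ⟨k, hk, rfl⟩ := (PySem.List.mem_enumerate_iff _ _ _).mp hq
    have hmem : (pvVals s)[k] ∈ s := pvVals_mem.mp (List.getElem_mem hk)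
    rw [PySem.Dict.getD_eq_get?_getD,
      pv_fsAux _ s 0 _ (PySem.Dict.contains_empty _) hmem]
    norm_num

theorem pvPairs_mem_iff {s : List Int} {q : Int × Int} :
    q ∈ pvPairs s ↔ ∃ k, ∃ (h : k < s.length), q = (s[k], (k : Int)) := by
  unfold pvPairs
  rw [List.mem_map]
  constructor
  · rintro ⟨p, hp, rfl⟩
    obtain ⟨k, hk, rfl⟩ := (PySem.List.mem_enumerate_iff _ _ _).mp hp
    exact ⟨k, hk, by norm_num⟩
  · rintro ⟨k, hk, rfl⟩
    exact ⟨((k : Int), s[k]), (PySem.List.mem_enumerate_iff _ _ _).mpr ⟨k, hk, by norm_num⟩, rfl⟩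

theorem pv_A_canon (s : List Int) :
    sort_rename s
      = (s.map (fun e => ((pvVals s).idxOf e : Int)),
         (PySem.List.enumerate (pvVals s) 0).map (fun q => (q.1, (s.idxOf q.2 : Int)))) := by
  rcases hv : pvVals s with _ | ⟨v, vr⟩
  case nil =>
    have hs : s = [] := by
      cases s with
      | nil => rfl
      | cons x xs =>
        have hx : x ∈ pvVals (x :: xs) := pvVals_mem.mpr (by simp)
        rw [hv] at hx; cases hx
    subst hs; rfl
  case cons =>
    have hvmem : v ∈ s := pvVals_mem.mp (by rw [hv]; simp)
    have hnd : (v :: vr).Nodup := hv ▸ pvVals_nodup s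
    obtain ⟨g0, gt, hg⟩ : ∃ g0 gt, pvGrp s v = g0 :: gt := by
      rcases hgg : pvGrp s v with _ | ⟨a, b⟩
      · exact absurd hgg (pvGrp_ne_nil hvmem)
      · exact ⟨a, b, rfl⟩
    have hfst : ∀ u ∈ v :: vr, ∀ p ∈ pvGrp s u, p.1 = u := fun u _ p hp => pvGrp_fst hp
    have hne : ∀ u ∈ vr, pvGrp s u ≠ [] :=
      fun u hu => pvGrp_ne_nil (pvVals_mem.mp (by rw [hv]; simp [hu]))
    have hg0 : g0.1 = v := hfst v (by simp) g0 (by rw [hg]; simp)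
    have hgt : ∀ p ∈ gt, p.1 = v := fun p hp => hfst v (by simp) p (by rw [hg]; simp [hp])
    have hlast : (gt.getLastD g0).1 = v := by
      rcases List.mem_cons.mp (List.getLastD_mem_cons (l := gt) (a := g0)) with h | h
      · rw [h, hg0]
      · exact hgt _ h
    rw [show sort_rename s
        = (((PySem.List.sorted2 (pvPairs s) (fun p => p.1) (fun p => p.2) false).foldl pvStepA
            (none, 0, List.replicate s.length none, PySem.Dict.empty)).2.2.1.map (fun o => o.getD 0),
           ((PySem.List.sorted2 (pvPairs s) (fun p => p.1) (fun p => p.2) false).foldl pvStepA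
            (none, 0, List.replicate s.length none, PySem.Dict.empty)).2.2.2.items) from rfl,
      pv_sorted2_eq_flatMap s, hv, List.flatMap_cons, List.foldl_append, hg, List.foldl_cons,
      pvStepA_none, pv_tailFold v gt hgt g0 hg0 0 _ _,
      pv_loopA (pvGrp s) vr (gt.getLastD g0) 0 _ _ (by rw [hlast]; exact hnd) hne
        (fun u hu p hp => pvGrp_fst hp)]
    refine congrArg₂ Prod.mk ?_ ?_
    · -- position_to_index component
      dsimp only
      have hcomb :
          (List.flatMap (pvGrp s) vr).foldl
            (fun l p => PySem.List.pySetD l p.2 (some (0 + 1 + (List.idxOf p.1 vr : Int))))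
            (gt.foldl (fun l p => PySem.List.pySetD l p.2 (some 0))
              (PySem.List.pySetD (List.replicate s.length none) g0.2 (some 0)))
          = ((v :: vr).flatMap (pvGrp s)).foldl
              (fun l p => PySem.List.pySetD l p.2 (some (List.idxOf p.1 (v :: vr) : Int)))
              (List.replicate s.length none) := by
        rw [List.flatMap_cons, List.foldl_append, hg, List.foldl_cons]
        have e0 : PySem.List.pySetD (List.replicate s.length (none : Option Int)) g0.2
              (some (List.idxOf g0.1 (v :: vr) : Int))
            = PySem.List.pySetD (List.replicate s.length none) g0.2 (some 0) := by
          rw [hg0, List.idxOf_cons_self]; norm_num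
        rw [e0]
        have e1 : gt.foldl (fun l p => PySem.List.pySetD l p.2
              (some (List.idxOf p.1 (v :: vr) : Int)))
              (PySem.List.pySetD (List.replicate s.length none) g0.2 (some 0))
            = gt.foldl (fun l p => PySem.List.pySetD l p.2 (some 0))
              (PySem.List.pySetD (List.replicate s.length none) g0.2 (some 0)) := by
          refine PySem.List.foldl_congr_mem _ _ _ _ ?_
          intro acc p hp
          rw [hgt p hp, List.idxOf_cons_self]; norm_num
        rw [e1]
        refine PySem.List.foldl_congr_mem _ _ _ _ ?_
        intro acc p hp
        obtain ⟨u, hu, hpu⟩ := List.mem_flatMap.mp hp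
        have hp1 : p.1 = u := pvGrp_fst hpu
        have hvp : v ≠ p.1 := by
          rw [hp1]; intro he
          exact (List.nodup_cons.mp hnd).1 (he ▸ hu)
        rw [List.idxOf_cons_ne _ hvp]
        push_cast; ring_nf
      rw [hcomb]
      refine List.ext_getElem ?_ ?_
      · rw [List.length_map, pv_setFold_length, List.length_replicate, List.length_map]
      · intro i hi1 hi2
        have hi : i < s.length := by
          rw [List.length_map, pv_setFold_length, List.length_replicate] at hi1; exact hi1
        rw [List.getElem_map, List.getElem_map]
        have hval := pv_setFold_value i (s[i], (i : Int))
          (fun p => (List.idxOf p.1 (v :: vr) : Int)) ((v :: vr).flatMap (pvGrp s))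
          (by
            rw [← hv]
            exact pv_flatMap_mem.mpr (pvPairs_mem_iff.mpr ⟨i, hi, rfl⟩))
          rfl
          (by
            intro q hq
            rw [← hv] at hq
            obtain ⟨k, hk, rfl⟩ := pvPairs_mem_iff.mp (pv_flatMap_mem.mp hq)
            exact Int.natCast_nonneg k)
          (by
            intro q hq he
            rw [← hv] at hq
            obtain ⟨k, hk, rfl⟩ := pvPairs_mem_iff.mp (pv_flatMap_mem.mp hq)
            have : k = i := by exact_mod_cast show (k : Int) = (i : Int) from he
            subst this; rfl)
          (List.replicate s.length none) (by rw [List.length_replicate]; exact hi)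
        rw [List.getElem?_eq_getElem (by rw [pv_setFold_length, List.length_replicate]; exact hi)] at hval
        rw [Option.some.injEq] at hval
        rw [hval]
        rfl
    · -- first_entry component
      dsimp only
      rw [PySem.Dict.items_foldl_insert_fresh (PySem.List.enumerate vr (0 + 1))
          (fun q : Int × Int => q.1) (fun q : Int × Int => ((pvGrp s q.2).headD (0, 0)).2)
          (PySem.Dict.empty.insert 0 g0.2)
          (by
            intro a ha
            obtain ⟨k, hk, rfl⟩ := (PySem.List.mem_enumerate_iff _ _ _).mp ha
            rw [PySem.Dict.contains_insert]
            simp only [PySem.Dict.contains_empty, Bool.or_false, beq_eq_false_iff_ne, ne_eq]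
            omega)
          (by rw [PySem.List.map_fst_enumerate]; exact PySem.List.nodup_pyRange_one _ _),
        PySem.List.enumerate_cons, List.map_cons,
        show (PySem.Dict.empty.insert (0 : Int) g0.2).items = [((0 : Int), g0.2)] from rfl,
        List.singleton_append]
      congr 1
      · rw [show g0.2 = ((pvGrp s v).headD (0, 0)).2 from by rw [hg]; rfl, pv_grp_head hvmem]
      · refine List.map_congr_left ?_
        intro q hq
        obtain ⟨k, hk, rfl⟩ := (PySem.List.mem_enumerate_iff _ _ _).mp hq
        have hmem : vr[k] ∈ s := pvVals_mem.mp (by rw [hv]; exact List.mem_cons_of_mem v (List.getElem_mem hk))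
        dsimp only
        rw [pv_grp_head hmem]

theorem sort_rename_eq (s : List Int) : sort_rename s = sort_rename_alt s := by
  rw [pv_A_canon, pv_B_canon]

-- ===== VERDICT (by name: the statement is the Claim_ definition above) =====
theorem sort_rename_spec : Claim_equal_sort_rename := by
  intro sequence _
  unfold Spec_sort_rename
  exact sort_rename_eq sequence
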